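-- pv_equiv track=rewrite | github.com/bgottlob/LILI-Interpreter | interpreter/extractor.py | object_dict_follow
-- ===== SOURCE A (Python) =====
-- def is_noun(tag):
--     """
--     Checks if a part of speech tag represents a noun. The tags ``"PRP"`` and those that begin with ``"NN"`` are considered nouns.
--
--     Args:
--         tag (str): The part of speech tag to be checked
--
--     Returns:
--         bool: ``True`` if the tag represents a noun, ``False`` if not
--     """
--     # Considers personal pronouns as nouns as long as any type of tagged noun (proper noun, etc.)
--     return (tag == "PRP" or tag.startswith("NN"))
--
-- def object_dict_follow(sent):
--     """
--     Extracts objects out of a sentence that contains *follow* as its :ref:`action <action>`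
--
--     Rules:
--
--     1. The first noun encountered is always the *person*
--     2. The second noun (if included) is always the *place*
--
--     Objects:
--
--     1. *person* - The person who will be followed
--     2. *place* - The location that the person will be followed to
--
--     Args:
--         sent (list): A part of speech tagged list of tokens representing a sentence
--
--     Returns:
--         dict: An :ref:`object dictionary <object-dictionary>` for the command
--     """
--
--     object_dict = {}
--     for token in sent:
--         if is_noun(token[1]):
--             # The current length of object_dict shows how many other nouns have been extracted from the sentence
--             if len(object_dict) == 0:
--                 object_dict["person"] = token[0].lower()
--             elif len(object_dict) == 1:
--                 object_dict["place"] = token[0].lower()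
--
--     return object_dict
-- ===== SOURCE B (Python) =====
-- def is_noun(tag):
--     return (tag == "PRP" or tag.startswith("NN"))
--
-- def _extract(keys, toks):
--     # Recursively consume the token list; each noun found consumes the next
--     # pending key ("person" then "place"); stops when keys run out.
--     if not keys or not toks:
--         return {}
--     word, tag = toks[0]
--     if is_noun(tag):
--         return {keys[0]: word.lower(), **_extract(keys[1:], toks[1:])}
--     return _extract(keys, toks[1:])
--
-- def object_dict_follow(sent):
--     return _extract(["person", "place"], sent)
-- ===== Notes on version B (the rewrite author's own statement) =====
-- stated objective: alternative
-- what changed: Replaces A's stateful loop branching on the growing dict's length by a recursion over the pending-key list and the token list: each noun found binds the head key and recurses on the remaining keys, terminating when keys run out.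
import Mathlib
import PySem

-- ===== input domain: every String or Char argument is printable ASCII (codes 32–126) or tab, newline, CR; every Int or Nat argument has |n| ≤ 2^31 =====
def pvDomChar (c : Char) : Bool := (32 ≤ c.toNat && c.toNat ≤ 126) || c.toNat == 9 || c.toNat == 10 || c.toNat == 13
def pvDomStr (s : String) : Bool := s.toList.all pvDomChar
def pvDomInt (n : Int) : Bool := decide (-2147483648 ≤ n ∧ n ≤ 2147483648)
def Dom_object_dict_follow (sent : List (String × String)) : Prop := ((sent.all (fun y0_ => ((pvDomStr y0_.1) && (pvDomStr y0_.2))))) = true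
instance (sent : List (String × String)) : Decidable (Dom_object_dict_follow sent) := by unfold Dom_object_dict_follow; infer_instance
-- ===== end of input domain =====

-- B replaces A's stateful dict-length branching loop by a recursion over the pending-key list and the token list (objective: alternative).

-- ===== PORT A =====
def is_noun (tag : String) : Bool :=
  tag == "PRP" || PySem.Str.startswith tag "NN"

-- loop body of A's for-loop, as a named helper
def odf_step (d : PySem.Dict String String) (token : String × String) : PySem.Dict String String :=
  if is_noun token.2 then
    if d.size == 0 then d.insert "person" (PySem.Str.lower token.1)
    else if d.size == 1 then d.insert "place" (PySem.Str.lower token.1)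
    else d
  else d

def object_dict_follow (sent : List (String × String)) : List (String × String) :=
  (sent.foldl odf_step (PySem.Dict.empty : PySem.Dict String String)).items

-- ===== PORT B =====
-- Source B's _extract: the keys "person"/"place" are distinct and each key is bound at
-- most once, so the Python dict literal {keys[0]: …, **rest} is exactly a cons.
def odf_extract : List String → List (String × String) → List (String × String)
  | [], _ => []
  | _ :: _, [] => []
  | k :: ks, t :: ts =>
    if is_noun t.2 then (k, PySem.Str.lower t.1) :: odf_extract ks ts
    else odf_extract (k :: ks) ts

def object_dict_follow_alt (sent : List (String × String)) : List (String × String) :=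
  odf_extract ["person", "place"] sent

-- ===== PRECONDITION & SPEC =====
def Spec_object_dict_follow (sent : List (String × String)) (out : List (String × String)) : Prop := out = object_dict_follow_alt sent
instance (sent : List (String × String)) (out : List (String × String)) : Decidable (Spec_object_dict_follow sent out) := by unfold Spec_object_dict_follow; infer_instance

-- ===== CLAIM (what is proved, stated in full; the proofs are below) =====
def Claim_equal_object_dict_follow : Prop := ∀ (sent : List (String × String)), Dom_object_dict_follow sent → Spec_object_dict_follow sent (object_dict_follow sent)

-- ===== LEMMAS AND PROOFS =====

-- once the dict has both keys, the rest of A's loop is a no-op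
theorem odf_loop2 (sent : List (String × String)) (x y : String) :
    sent.foldl odf_step (PySem.Dict.mk [("person", x), ("place", y)]) =
      PySem.Dict.mk [("person", x), ("place", y)] := by
  induction sent with
  | nil => rfl
  | cons t ts ih =>
    have h : odf_step (PySem.Dict.mk [("person", x), ("place", y)]) t =
        PySem.Dict.mk [("person", x), ("place", y)] := by
      simp [odf_step, PySem.Dict.size]
    simpa [List.foldl, h] using ih

-- when no keys are pending, B's recursion returns []
theorem odf_extract_nil_keys (sent : List (String × String)) :
    odf_extract [] sent = [] := by
  cases sent <;> rfl

-- with "person" already set, A's loop fills "place" with the next noun and ignores the rest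
theorem odf_loop1 (sent : List (String × String)) (x : String) :
    (sent.foldl odf_step (PySem.Dict.mk [("person", x)])).items =
      ("person", x) :: odf_extract ["place"] sent := by
  induction sent with
  | nil => rfl
  | cons t ts ih =>
    by_cases h : is_noun t.2
    · have hins : odf_step (PySem.Dict.mk [("person", x)]) t =
          PySem.Dict.mk [("person", x), ("place", PySem.Str.lower t.1)] := by
        simp [odf_step, h, PySem.Dict.size, PySem.Dict.insert,
          PySem.Dict.contains]
      simp [List.foldl, hins, odf_loop2, odf_extract, h, odf_extract_nil_keys]
    · have hstep : odf_step (PySem.Dict.mk [("person", x)]) t = PySem.Dict.mk [("person", x)] := by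
        simp [odf_step, h]
      simpa [List.foldl, hstep, odf_extract, h] using ih

-- from the empty dict, A's loop produces exactly B's recursion on the full key list
theorem odf_loop0 (sent : List (String × String)) :
    (sent.foldl odf_step PySem.Dict.empty).items =
      odf_extract ["person", "place"] sent := by
  induction sent with
  | nil => rfl
  | cons t ts ih =>
    by_cases h : is_noun t.2
    · have hins : odf_step PySem.Dict.empty t =
          PySem.Dict.mk [("person", PySem.Str.lower t.1)] := by
        simp [odf_step, h, PySem.Dict.size, PySem.Dict.empty,
          PySem.Dict.insert, PySem.Dict.contains]
      simp [List.foldl, hins, odf_loop1, odf_extract, h]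
    · have hstep : odf_step PySem.Dict.empty t = PySem.Dict.empty := by
        simp [odf_step, h]
      simpa [List.foldl, hstep, odf_extract, h] using ih

-- ===== VERDICT (by name: the statement is the Claim_ definition above) =====
theorem object_dict_follow_spec : Claim_equal_object_dict_follow := by
  intro sent _
  unfold Spec_object_dict_follow object_dict_follow object_dict_follow_alt
  exact odf_loop0 sent
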